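-- pv_equiv track=rewrite | github.com/queelius/computational-explorations | src/coprime_ramsey_sat.py | find_coprime_cliques
-- ===== SOURCE A (Python) =====
-- import math
-- from typing import List, Tuple, Dict, Optional, Set
--
-- def find_coprime_cliques(n: int, k: int) -> List[Tuple[int, ...]]:
--     """
--     Enumerate all k-cliques in the coprime graph on [n].
--
--     A k-clique is a set of k vertices that are pairwise coprime.
--     """
--     if k < 1:
--         return []
--     if k == 1:
--         return [(v,) for v in range(1, n + 1)]
--
--     vertices = list(range(1, n + 1))
--     cliques = []
--
--     # Build adjacency for coprimality
--     adj = {v: set() for v in vertices}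
--     for i in vertices:
--         for j in vertices:
--             if i < j and math.gcd(i, j) == 1:
--                 adj[i].add(j)
--                 adj[j].add(i)
--
--     # Enumerate cliques by extension: start from sorted vertex lists
--     # to avoid duplicates. Use recursive backtracking with pruning.
--     def extend(current: List[int], candidates: List[int]):
--         if len(current) == k:
--             cliques.append(tuple(current))
--             return
--         needed = k - len(current)
--         for idx, v in enumerate(candidates):
--             if len(candidates) - idx < needed:
--                 break  # Not enough candidates left
--             # v must be coprime with all current members
--             if all(v in adj[u] for u in current):
--                 # Remaining candidates are those after v that are adjacent to v
--                 new_candidates = [w for w in candidates[idx + 1:] if w in adj[v]]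
--                 extend(current + [v], new_candidates)
--
--     extend([], vertices)
--     return cliques
-- ===== SOURCE B (Python) =====
-- import math
--
-- def find_coprime_cliques(n: int, k: int):
--     """Enumerate all k-cliques in the coprime graph on [n]."""
--     if k < 1:
--         return []
--     # Breadth-first: each state is (partial clique, candidates usable to extend it).
--     states = [((), list(range(1, n + 1)))]
--     for _ in range(k):
--         if not states:
--             break
--         states = [(c + (v,), [w for w in cand[i + 1:] if math.gcd(v, w) == 1])
--                   for c, cand in states
--                   for i, v in enumerate(cand)
--                   if len(cand) - i >= k - len(c)]
--     return [c for c, _ in states]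
-- ===== Notes on version B (the rewrite author's own statement) =====
-- stated objective: alternative
-- what changed: Replaces A's precomputed adjacency dictionary and recursive backtracking (extend with an inner enumerate loop and break) by a recursion-free breadth-first expansion: one comprehension per level that grows every (partial clique, candidate list) state in place, filtering candidates by gcd directly; same pruning strength, same lexicographic output order.
import Mathlib
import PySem

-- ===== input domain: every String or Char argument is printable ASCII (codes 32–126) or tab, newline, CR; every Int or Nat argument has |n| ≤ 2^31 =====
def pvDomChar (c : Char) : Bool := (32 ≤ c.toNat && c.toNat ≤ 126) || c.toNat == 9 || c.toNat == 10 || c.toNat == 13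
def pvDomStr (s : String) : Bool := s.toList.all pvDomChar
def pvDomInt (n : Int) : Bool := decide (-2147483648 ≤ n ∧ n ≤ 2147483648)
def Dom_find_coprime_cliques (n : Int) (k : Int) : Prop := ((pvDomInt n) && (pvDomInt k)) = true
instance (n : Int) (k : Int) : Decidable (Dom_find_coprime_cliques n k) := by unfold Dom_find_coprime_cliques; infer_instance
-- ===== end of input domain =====

-- B replaces A's adjacency dictionary + recursive backtracking by a recursion-free
-- breadth-first expansion of (partial clique, candidate list) states, one level per step.

-- ===== PORT A =====
-- body of A's inner adjacency loop: `if i < j and math.gcd(i, j) == 1: adj[i].add(j); adj[j].add(i)`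
-- (adj[i].add(j) is ported with Dict.modify; the Set.empty default is never consulted:
--  every key is present from the dict comprehension, exactly as in Python)
def fcStep (i : Int) (d : PySem.Dict Int (PySem.Set Int)) (j : Int) : PySem.Dict Int (PySem.Set Int) :=
  if i < j ∧ Int.gcd i j = 1 then
    (d.modify i PySem.Set.empty (fun s => PySem.Set.add s j)).modify j
      PySem.Set.empty (fun s => PySem.Set.add s i)
  else d

-- `adj = {v: set() for v in vertices}` then the nested i/j loops
def fcAdj (vertices : List Int) : PySem.Dict Int (PySem.Set Int) :=
  let adj0 := vertices.foldl (fun d v => d.insert v PySem.Set.empty) PySem.Dict.empty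
  vertices.foldl (fun d i => vertices.foldl (fcStep i) d) adj0

-- `extend(current, candidates)`; fcGo is its `for idx, v in enumerate(candidates)` loop,
-- run over the suffix `rest` of candidates: Python's `len(candidates) - idx` is exactly the
-- length of that suffix, and `break` returns [] for the whole remaining suffix
mutual
  def fcExtend (adj : PySem.Dict Int (PySem.Set Int)) (k : Int)
      (current candidates : List Int) : List (List Int) :=
    if (current.length : Int) = k then [current]
    else fcGo adj k current candidates
  termination_by 2 * candidates.length + 2
  decreasing_by omega
  def fcGo (adj : PySem.Dict Int (PySem.Set Int)) (k : Int)
      (current rest : List Int) : List (List Int) :=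
    match rest with
    | [] => []
    | v :: tl =>
      if ((tl.length : Int) + 1 < k - (current.length : Int)) then []
      else
        (if current.all (fun u => PySem.Set.contains (adj.getD u PySem.Set.empty) v) then
          fcExtend adj k (current ++ [v])
            (tl.filter (fun w => PySem.Set.contains (adj.getD v PySem.Set.empty) w))
        else []) ++ fcGo adj k current tl
  termination_by 2 * rest.length + 1
  decreasing_by
    · have := List.length_filter_le (fun w => PySem.Set.contains (adj.getD v PySem.Set.empty) w) tl
      simp only [List.length_cons]; omega
    · simp only [List.length_cons]; omega
end

def find_coprime_cliques (n : Int) (k : Int) : List (List Int) :=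
  if k < 1 then []
  else if k = 1 then (PySem.List.pyRange 1 (n + 1) 1).map (fun v => [v])
  else
    let vertices := PySem.List.pyRange 1 (n + 1) 1
    fcExtend (fcAdj vertices) k [] vertices

-- ===== PORT B =====
-- the inner comprehension `for i, v in enumerate(cand) if len(cand) - i >= k - len(c)`,
-- walked over the suffixes of cand (Python's len(cand) - i is the current suffix length);
-- each kept v yields the state (c + (v,), [w for w in cand[i+1:] if gcd(v, w) == 1])
def fcExpand (k : Int) (c : List Int) : List Int → List (List Int × List Int)
  | [] => []
  | v :: rest =>
    (if ((rest.length : Int) + 1 ≥ k - (c.length : Int)) then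
      [(c ++ [v], rest.filter (fun w => Int.gcd v w == 1))]
    else [])
    ++ fcExpand k c rest

-- one `for _ in range(k)` iteration: rebuild the whole states list
def fcLevel (k : Int) (states : List (List Int × List Int)) : List (List Int × List Int) :=
  states.flatMap (fun s => fcExpand k s.1 s.2)

-- `if not states: break` — once states is empty every later iteration leaves it empty,
-- so the break is ported as keeping the empty list unchanged
def fcLoopStep (k : Int) (states : List (List Int × List Int)) : List (List Int × List Int) :=
  if states.isEmpty then states else fcLevel k states

def find_coprime_cliques_alt (n : Int) (k : Int) : List (List Int) :=
  if k < 1 then []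
  else
    ((PySem.List.pyRange 0 k 1).foldl (fun states _ => fcLoopStep k states)
      [([], PySem.List.pyRange 1 (n + 1) 1)]).map (·.1)

-- ===== PRECONDITION & SPEC =====
def Spec_find_coprime_cliques (n : Int) (k : Int) (out : List (List Int)) : Prop := out = find_coprime_cliques_alt n k
instance (n : Int) (k : Int) (out : List (List Int)) : Decidable (Spec_find_coprime_cliques n k out) := by unfold Spec_find_coprime_cliques; infer_instance

-- ===== CLAIM (what is proved, stated in full; the proofs are below) =====
def Claim_equal_find_coprime_cliques : Prop := ∀ (n : Int) (k : Int), Dom_find_coprime_cliques n k → Spec_find_coprime_cliques n k (find_coprime_cliques n k)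

-- ===== LEMMAS AND PROOFS =====

-- pairwise coprimality of a list, the common specification both ports are reduced to
def fcPairAll (c : List Int) : Bool :=
  (PySem.List.combinations c 2).all (fun ab =>
    match ab with
    | [a, b] => Int.gcd a b == 1
    | _ => true)

-- j-fold iteration of fcLevel (the `for _ in range(k)` loop, counted)
def fcIter (k : Int) : Nat → List (List Int × List Int) → List (List Int × List Int)
  | 0, st => st
  | j + 1, st => fcIter k j (fcLevel k st)

theorem fcIter_foldl (k : Int) (l : List Int) (st : List (List Int × List Int)) :
    l.foldl (fun states _ => fcLoopStep k states) st = fcIter k l.length st := by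
  induction l generalizing st with
  | nil => rfl
  | cons x l ih =>
    simp only [List.foldl_cons, List.length_cons, fcIter]
    cases st with
    | nil => rw [show fcLoopStep k [] = [] from rfl, show fcLevel k [] = [] from rfl]; exact ih _
    | cons s st => rw [show fcLoopStep k (s :: st) = fcLevel k (s :: st) from rfl]; exact ih _

theorem fcLevel_append (k : Int) (xs ys : List (List Int × List Int)) :
    fcLevel k (xs ++ ys) = fcLevel k xs ++ fcLevel k ys := by
  simp [fcLevel]

theorem fcIter_append (k : Int) (j : Nat) : ∀ (xs ys : List (List Int × List Int)),
    fcIter k j (xs ++ ys) = fcIter k j xs ++ fcIter k j ys := by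
  induction j with
  | zero => intro xs ys; rfl
  | succ j ih => intro xs ys; simp only [fcIter, fcLevel_append]; exact ih _ _

theorem fcIter_nil (k : Int) (j : Nat) : fcIter k j [] = [] := by
  induction j with
  | zero => rfl
  | succ j ih => simp only [fcIter, fcLevel, List.flatMap_nil]; exact ih

theorem fcLevel_singleton (k : Int) (c cand : List Int) :
    fcLevel k [(c, cand)] = fcExpand k c cand := by
  simp [fcLevel]

theorem fcAdj0_getD (l : List Int) (d : PySem.Dict Int (PySem.Set Int)) (u : Int)
    (h : d.getD u PySem.Set.empty = PySem.Set.empty) :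
    (l.foldl (fun d v => d.insert v PySem.Set.empty) d).getD u PySem.Set.empty = PySem.Set.empty := by
  induction l generalizing d with
  | nil => simpa
  | cons x l ih =>
    simp only [List.foldl_cons]
    refine ih _ ?_
    rw [PySem.Dict.getD_insert]
    split
    · rfl
    · exact h

theorem fcAdj_inner_mem (i u w : Int) (l : List Int) (d : PySem.Dict Int (PySem.Set Int)) :
    w ∈ (l.foldl (fcStep i) d).getD u PySem.Set.empty
      ↔ w ∈ d.getD u PySem.Set.empty
        ∨ ∃ j ∈ l, i < j ∧ Int.gcd i j = 1 ∧ ((u = i ∧ w = j) ∨ (u = j ∧ w = i)) := by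
  induction l generalizing d with
  | nil => simp
  | cons x l ih =>
    simp only [List.foldl_cons]
    rw [ih]
    by_cases hc : i < x ∧ Int.gcd i x = 1
    · have hix : i ≠ x := ne_of_lt hc.1
      have hmem : w ∈ (fcStep i d x).getD u PySem.Set.empty
          ↔ (if u = x then (w ∈ d.getD x PySem.Set.empty ∨ w = i)
             else if u = i then (w ∈ d.getD i PySem.Set.empty ∨ w = x)
             else w ∈ d.getD u PySem.Set.empty) := by
        simp only [fcStep, if_pos hc, PySem.Dict.getD_modify, if_neg (Ne.symm hix)]
        split_ifs <;> simp_all [PySem.Set.mem_add]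
      rw [hmem, List.exists_mem_cons_iff]
      obtain ⟨hlt, hg⟩ := hc
      split_ifs with h1 h2 <;> subst_vars <;> aesop
    · have hmem : (fcStep i d x) = d := by simp [fcStep, hc]
      rw [hmem, List.exists_mem_cons_iff]
      aesop

theorem fcAdj_outer_mem (vs : List Int) (u w : Int) (L : List Int) (d : PySem.Dict Int (PySem.Set Int)) :
    w ∈ (L.foldl (fun d i => vs.foldl (fcStep i) d) d).getD u PySem.Set.empty
      ↔ w ∈ d.getD u PySem.Set.empty
        ∨ ∃ i ∈ L, ∃ j ∈ vs, i < j ∧ Int.gcd i j = 1 ∧ ((u = i ∧ w = j) ∨ (u = j ∧ w = i)) := by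
  induction L generalizing d with
  | nil => simp
  | cons x L ih =>
    simp only [List.foldl_cons]
    rw [ih, fcAdj_inner_mem, List.exists_mem_cons_iff]
    exact or_assoc

theorem fcAdj_mem (vs : List Int) (u w : Int) :
    w ∈ (fcAdj vs).getD u PySem.Set.empty
      ↔ ∃ i ∈ vs, ∃ j ∈ vs, i < j ∧ Int.gcd i j = 1 ∧ ((u = i ∧ w = j) ∨ (u = j ∧ w = i)) := by
  unfold fcAdj
  rw [fcAdj_outer_mem, fcAdj0_getD vs _ u (by rw [PySem.Dict.getD_empty])]
  simp [PySem.Set.empty]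

theorem fcAdj_mem_iff (vs : List Int) (u w : Int) :
    w ∈ (fcAdj vs).getD u PySem.Set.empty
      ↔ u ∈ vs ∧ w ∈ vs ∧ u ≠ w ∧ Int.gcd u w = 1 := by
  rw [fcAdj_mem]
  constructor
  · rintro ⟨i, hi, j, hj, hij, hg, (⟨rfl, rfl⟩ | ⟨rfl, rfl⟩)⟩
    · exact ⟨hi, hj, ne_of_lt hij, hg⟩
    · exact ⟨hj, hi, (ne_of_lt hij).symm, by rw [Int.gcd_comm]; exact hg⟩
  · rintro ⟨hu, hw, hne, hg⟩
    rcases lt_or_gt_of_ne hne with h | h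
    · exact ⟨u, hu, w, hw, h, hg, Or.inl ⟨rfl, rfl⟩⟩
    · exact ⟨w, hw, u, hu, h, by rw [Int.gcd_comm]; exact hg, Or.inr ⟨rfl, rfl⟩⟩

theorem fc_contains_eq (s : PySem.Set Int) (x : Int) :
    PySem.Set.contains s x = decide (x ∈ s) := by simp [pysem]

theorem fc_combinations_filter (p : Int → Bool) (xs : List Int) : ∀ (r : Nat),
    PySem.List.combinations (xs.filter p) r = (PySem.List.combinations xs r).filter (fun c => c.all p) := by
  induction xs with
  | nil =>
    intro r
    cases r <;> simp [PySem.List.combinations_zero, PySem.List.combinations_nil_succ]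
  | cons x xs ih =>
    intro r
    cases r with
    | zero => simp [PySem.List.combinations_zero]
    | succ r =>
      by_cases hx : p x
      · rw [List.filter_cons_of_pos hx, PySem.List.combinations_cons_succ,
            PySem.List.combinations_cons_succ, ih, ih, List.filter_append, List.filter_map]
        congr 1
        congr 1
        apply List.filter_congr
        intro c _
        simp [Function.comp, hx]
      · rw [List.filter_cons_of_neg hx, PySem.List.combinations_cons_succ, ih,
            List.filter_append, List.filter_map]
        have : (PySem.List.combinations xs r).filter ((fun c => c.all p) ∘ (x :: ·)) = [] := by
          apply List.filter_eq_nil_iff.mpr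
          intro c _
          simp [Function.comp, hx]
        rw [this, List.map_nil, List.nil_append]

theorem fcPairAll_cons (v : Int) (c : List Int) :
    fcPairAll (v :: c) = (c.all (fun w => Int.gcd v w == 1) && fcPairAll c) := by
  simp only [fcPairAll, PySem.List.combinations_cons_succ, PySem.List.combinations_one,
    List.all_append, List.all_map]
  rfl

theorem fc_filter_pairAll_map_cons (v : Int) (xs : List Int) (r : Nat) :
    ((PySem.List.combinations xs r).map (v :: ·)).filter fcPairAll
      = ((PySem.List.combinations (xs.filter (fun w => Int.gcd v w == 1)) r).filter fcPairAll).map (v :: ·) := by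
  rw [List.filter_map, fc_combinations_filter, List.filter_filter]
  congr 1
  apply List.filter_congr
  intro c _
  simp [Function.comp, fcPairAll_cons, Bool.and_comm]

theorem fc_nodup_pyRange : ∀ (m : Nat) (a b : Int), (b - a).toNat ≤ m → (PySem.List.pyRange a b 1).Nodup := by
  intro m
  induction m with
  | zero =>
    intro a b h
    have : (PySem.List.pyRange a b 1).length = 0 := by
      rw [PySem.List.length_pyRange_one]; omega
    simp [List.length_eq_zero_iff.mp this]
  | succ m ih =>
    intro a b h
    by_cases hab : a < b
    · rw [PySem.List.pyRange_one_cons hab]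
      refine List.Nodup.cons ?_ (ih (a + 1) b (by omega))
      intro hmem
      have := PySem.List.mem_pyRange_one.mp hmem
      omega
    · have : (PySem.List.pyRange a b 1).length = 0 := by
        rw [PySem.List.length_pyRange_one]; omega
      simp [List.length_eq_zero_iff.mp this]

theorem fcPairAll_nil : fcPairAll [] = true := rfl

theorem fcGo_eq (vs : List Int) (hvs : vs.Nodup) (k : Int) :
    ∀ (m : Nat) (current rest : List Int),
      rest.length ≤ m →
      rest.Sublist vs →
      (∀ w ∈ rest, ∀ u ∈ current, w ∈ (fcAdj vs).getD u PySem.Set.empty) →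
      (current.length : Int) < k →
      fcGo (fcAdj vs) k current rest
       = ((PySem.List.combinations rest (k - (current.length : Int)).toNat).filter fcPairAll).map (current ++ ·) := by
  intro m
  induction m with
  | zero =>
    intro current rest h1 h2 h3 h4
    obtain ⟨j, hj⟩ : ∃ j, (k - (current.length : Int)).toNat = j + 1 :=
      ⟨(k - (current.length : Int)).toNat - 1, by omega⟩
    cases rest with
    | nil => rw [hj]; simp [fcGo, PySem.List.combinations_nil_succ]
    | cons v tl => simp at h1
  | succ m ih =>
    intro current rest h1 h2 h3 h4
    obtain ⟨j, hj⟩ : ∃ j, (k - (current.length : Int)).toNat = j + 1 :=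
      ⟨(k - (current.length : Int)).toNat - 1, by omega⟩
    cases rest with
    | nil => rw [hj]; simp [fcGo, PySem.List.combinations_nil_succ]
    | cons v tl =>
      rw [fcGo]
      by_cases hshort : ((tl.length : Int) + 1 < k - (current.length : Int))
      · rw [if_pos hshort]
        have hlen : (v :: tl).length < (k - (current.length : Int)).toNat := by
          simp only [List.length_cons]; omega
        rw [PySem.List.combinations_eq_nil_of_length_lt _ hlen]
        simp
      · rw [if_neg hshort]
        have hnd : (v :: tl).Nodup := List.Nodup.sublist h2 hvs
        have hvmem : v ∈ vs := h2.subset (List.mem_cons_self)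
        have htl_sub : tl.Sublist vs := (List.sublist_cons_self v tl).trans h2
        have hall : (current.all (fun u => PySem.Set.contains ((fcAdj vs).getD u PySem.Set.empty) v)) = true := by
          rw [List.all_eq_true]
          intro u hu
          rw [fc_contains_eq, decide_eq_true_eq]
          exact h3 v (List.mem_cons_self) u hu
        rw [if_pos hall]
        have hfilt : tl.filter (fun w => PySem.Set.contains ((fcAdj vs).getD v PySem.Set.empty) w)
            = tl.filter (fun w => Int.gcd v w == 1) := by
          apply List.filter_congr
          intro w hw
          have hwvs : w ∈ vs := htl_sub.subset hw
          have hwv : v ≠ w := by rintro rfl; exact (List.nodup_cons.mp hnd).1 hw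
          have hdd : decide (w ∈ (fcAdj vs).getD v PySem.Set.empty)
              = decide (v ∈ vs ∧ w ∈ vs ∧ v ≠ w ∧ Int.gcd v w = 1) :=
            decide_eq_decide.mpr (fcAdj_mem_iff vs v w)
          rw [fc_contains_eq, hdd]
          simp [hvmem, hwvs, hwv, Bool.beq_eq_decide_eq]
        have hext : fcExtend (fcAdj vs) k (current ++ [v]) (tl.filter (fun w => Int.gcd v w == 1))
            = ((PySem.List.combinations (tl.filter (fun w => Int.gcd v w == 1)) j).filter fcPairAll).map
                (fun c => current ++ v :: c) := by
          by_cases hdone : ((current.length : Int) + 1 = k)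
          · have hj0 : j = 0 := by omega
            have hkpos : (((current ++ [v]).length : Nat) : Int) = k := by
              simp only [List.length_append, List.length_cons, List.length_nil]
              omega
            rw [fcExtend, if_pos hkpos]
            rw [hj0, PySem.List.combinations_zero]
            simp [fcPairAll_nil]
          · have hkneg : ¬ ((((current ++ [v]).length : Nat) : Int) = k) := by
              simp only [List.length_append, List.length_cons, List.length_nil]
              omega
            rw [fcExtend, if_neg hkneg]
            have hres := ih (current ++ [v]) (tl.filter (fun w => Int.gcd v w == 1))
              (by have := List.length_filter_le (fun w => Int.gcd v w == 1) tl
                  simp only [List.length_cons] at h1; omega)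
              (List.filter_sublist.trans htl_sub)
              (by intro w hw u hu
                  have hwtl : w ∈ tl := List.mem_of_mem_filter hw
                  have hg : Int.gcd v w = 1 := by
                    have := List.of_mem_filter hw
                    simpa using this
                  rcases List.mem_append.mp hu with hu | hu
                  · exact h3 w (List.mem_cons_of_mem _ hwtl) u hu
                  · rw [List.mem_singleton.mp hu]
                    have hwvs : w ∈ vs := htl_sub.subset hwtl
                    have hwv : v ≠ w := by rintro rfl; exact (List.nodup_cons.mp hnd).1 hwtl
                    exact (fcAdj_mem_iff vs v w).mpr ⟨hvmem, hwvs, hwv, hg⟩)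
              (by simp only [List.length_append, List.length_cons, List.length_nil]; omega)
            rw [hres]
            have hjj : (k - ((current ++ [v]).length : Int)).toNat = j := by
              simp only [List.length_append, List.length_cons, List.length_nil]
              omega
            rw [hjj]
            apply List.map_congr_left
            intro c _
            simp
        have htail : fcGo (fcAdj vs) k current tl
            = ((PySem.List.combinations tl (j + 1)).filter fcPairAll).map (current ++ ·) := by
          have := ih current tl (by simp only [List.length_cons] at h1; omega) htl_sub
            (fun w hw u hu => h3 w (List.mem_cons_of_mem _ hw) u hu) h4
          rwa [hj] at this
        rw [hfilt, hext, htail, hj, PySem.List.combinations_cons_succ, List.filter_append,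
          List.map_append, fc_filter_pairAll_map_cons v tl j]
        congr 1
        rw [List.map_map]
        apply List.map_congr_left
        intro c _
        simp

theorem fcPairAll_singleton (v : Int) : fcPairAll [v] = true := by
  rw [fcPairAll_cons]; rfl

theorem fcIter_eq (k : Int) : ∀ (m : Nat) (j : Nat) (c cand : List Int),
    cand.length ≤ m → (k - (c.length : Int)) = (j : Int) →
    (fcIter k j [(c, cand)]).map (·.1)
      = ((PySem.List.combinations cand j).filter fcPairAll).map (c ++ ·) := by
  intro m
  induction m with
  | zero =>
    intro j c cand h1 h2
    have hc : cand = [] := List.length_eq_zero_iff.mp (by omega)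
    subst hc
    cases j with
    | zero => simp [fcIter, PySem.List.combinations_zero, fcPairAll_nil]
    | succ j =>
      simp only [fcIter, fcLevel_singleton, fcExpand, fcIter_nil,
        PySem.List.combinations_nil_succ]
      simp
  | succ m ih =>
    intro j c cand h1 h2
    cases cand with
    | nil =>
      cases j with
      | zero => simp [fcIter, PySem.List.combinations_zero, fcPairAll_nil]
      | succ j =>
        simp only [fcIter, fcLevel_singleton, fcExpand, fcIter_nil,
          PySem.List.combinations_nil_succ]
        simp
    | cons v rest =>
      cases j with
      | zero => simp [fcIter, PySem.List.combinations_zero, fcPairAll_nil]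
      | succ j =>
        have hstep : fcIter k (j + 1) [(c, v :: rest)]
            = fcIter k j (fcExpand k c (v :: rest)) := by
          simp only [fcIter, fcLevel_singleton]
        have hrest : fcIter k j (fcExpand k c rest) = fcIter k (j + 1) [(c, rest)] := by
          simp only [fcIter, fcLevel_singleton]
        rw [hstep]
        show (fcIter k j
            ((if ((rest.length : Int) + 1 ≥ k - (c.length : Int)) then
                [(c ++ [v], rest.filter (fun w => Int.gcd v w == 1))]
              else []) ++ fcExpand k c rest)).map (·.1) = _
        rw [fcIter_append, List.map_append, hrest]
        have htail := ih (j + 1) c rest (by simp only [List.length_cons] at h1; omega) h2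
        by_cases hg : ((rest.length : Int) + 1 ≥ k - (c.length : Int))
        · rw [if_pos hg]
          have hhead := ih j (c ++ [v]) (rest.filter (fun w => Int.gcd v w == 1))
            (by have := List.length_filter_le (fun w => Int.gcd v w == 1) rest
                simp only [List.length_cons] at h1; omega)
            (by simp only [List.length_append, List.length_cons, List.length_nil]; omega)
          rw [hhead, htail, PySem.List.combinations_cons_succ, List.filter_append,
            List.map_append, fc_filter_pairAll_map_cons v rest j]
          congr 1
          rw [List.map_map]
          apply List.map_congr_left
          intro c' _
          simp
        · rw [if_neg hg, fcIter_nil, htail]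
          have h1' : (v :: rest).length < j + 1 := by simp only [List.length_cons]; omega
          have h2' : rest.length < j + 1 := by simp only [List.length_cons] at h1'; omega
          rw [PySem.List.combinations_eq_nil_of_length_lt _ h1',
            PySem.List.combinations_eq_nil_of_length_lt _ h2']
          simp

theorem fcB_eq (n k : Int) (hk : ¬ k < 1) :
    find_coprime_cliques_alt n k
      = (PySem.List.combinations (PySem.List.pyRange 1 (n + 1) 1) k.toNat).filter fcPairAll := by
  unfold find_coprime_cliques_alt
  rw [if_neg hk, fcIter_foldl, PySem.List.length_pyRange_one]
  have : (k - 0).toNat = k.toNat := by omega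
  rw [this]
  have := fcIter_eq k (PySem.List.pyRange 1 (n + 1) 1).length k.toNat []
    (PySem.List.pyRange 1 (n + 1) 1) le_rfl (by simp; omega)
  simpa using this

theorem fc_main (n k : Int) : find_coprime_cliques n k = find_coprime_cliques_alt n k := by
  by_cases hk1 : k < 1
  · unfold find_coprime_cliques find_coprime_cliques_alt
    simp [hk1]
  · rw [fcB_eq n k hk1]
    unfold find_coprime_cliques
    rw [if_neg hk1]
    by_cases hk2 : k = 1
    · rw [if_pos hk2, hk2]
      rw [show ((1 : Int)).toNat = 1 from rfl, PySem.List.combinations_one]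
      rw [List.filter_eq_self.mpr]
      intro c hc
      obtain ⟨v, _, rfl⟩ := List.mem_map.mp hc
      exact fcPairAll_singleton v
    · rw [if_neg hk2]
      have hvs := fc_nodup_pyRange (n + 1 - 1).toNat 1 (n + 1) (by omega)
      rw [fcExtend, if_neg (by simp; omega)]
      rw [fcGo_eq (PySem.List.pyRange 1 (n + 1) 1) hvs k (PySem.List.pyRange 1 (n + 1) 1).length
        [] (PySem.List.pyRange 1 (n + 1) 1) le_rfl (List.Sublist.refl _)
        (by intro w hw u hu; simp at hu) (by simp; omega)]
      simp

-- ===== VERDICT (by name: the statement is the Claim_ definition above) =====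
theorem find_coprime_cliques_spec : Claim_equal_find_coprime_cliques := by
  intro n k _
  unfold Spec_find_coprime_cliques
  exact fc_main n k
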